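-- pv_equiv track=rewrite | github.com/alvonruff/isfdb-python3 | common/isbn.py | ISBNValidFormat
-- ===== SOURCE A (Python) =====
-- def ISBNValidFormat(isbn):
--         # Returns 1 if the passed parameter follows the standard ISBN format, 0 otherwise
--         # Note that only ISBN format is checked; checksum validation is not performed
--         isbn = str.replace(str(isbn), '-', '')
--         isbn = str.replace(isbn, ' ', '')
--         if (len(isbn) != 10) and (len(isbn) != 13):
--                 return 0
--         # ISBN-13s alway start with 978 or 979
--         if (len(isbn) == 13) and (isbn[:3] not in ('978', '979')):
--                 return 0
--
--         counter = 0
--         while counter < len(isbn)-1: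
--                 if isbn[counter] in ['0', '1', '2', '3', '4', '5', '6', '7', '8', '9']:
--                         pass
--                 else:
--                         return 0
--                 counter += 1
--
--         if isbn[len(isbn)-1] in ['0', '1', '2', '3', '4', '5', '6', '7', '8', '9', 'X']:
--                 pass
--         else:
--                 return 0
--         return 1
-- ===== SOURCE B (Python) =====
-- import re
--
-- _ISBN_RE = re.compile(r'(97[89])?[0-9]{9}[0-9X]')
--
-- def ISBNValidFormat(isbn):
--     # Same preprocessing as the original, then a single anchored regex match:
--     # optional 978/979 prefix, nine digits, one check character [0-9X].
--     isbn = str(isbn).replace('-', '').replace(' ', '')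
--     return 1 if _ISBN_RE.fullmatch(isbn) else 0
-- ===== Notes on version B (the rewrite author's own statement) =====
-- stated objective: idiomatic
-- what changed: Replaces the length checks, prefix tuple test and the explicit per-character while loop with a single anchored regex fullmatch r'(97[89])?[0-9]{9}[0-9X]' after the identical hyphen/space stripping.
import Mathlib
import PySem

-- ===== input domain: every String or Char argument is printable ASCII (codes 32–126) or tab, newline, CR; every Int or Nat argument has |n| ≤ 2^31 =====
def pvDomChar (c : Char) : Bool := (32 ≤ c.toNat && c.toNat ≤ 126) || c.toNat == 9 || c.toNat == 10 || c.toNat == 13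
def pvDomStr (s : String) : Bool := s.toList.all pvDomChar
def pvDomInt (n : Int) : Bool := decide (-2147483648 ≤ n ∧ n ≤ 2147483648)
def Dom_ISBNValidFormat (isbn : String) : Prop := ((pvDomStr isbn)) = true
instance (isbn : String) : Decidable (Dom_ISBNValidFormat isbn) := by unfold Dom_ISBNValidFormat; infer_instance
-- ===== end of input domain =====

-- B replaces A's length checks, prefix tuple test and per-character while loop with one
-- anchored regex fullmatch r'(97[89])?[0-9]{9}[0-9X]'; same preprocessing, same cost.

-- ===== PORT A =====

-- the list ['0','1',…,'9'] A's membership tests use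
def pvDigitsA : List Char := ['0','1','2','3','4','5','6','7','8','9']

-- A's while loop from the current counter, followed by the final isbn[len-1] check;
-- both index accesses are within range whenever reached (counter < len-1; len ∈ {10,13})
def pvAWhile (s : List Char) (counter : Nat) : Int :=
  if counter < s.length - 1 then
    if s.getD counter ' ' ∈ pvDigitsA then pvAWhile s (counter + 1) else 0
  else
    if s.getD (s.length - 1) ' ' ∈ (pvDigitsA ++ ['X']) then 1 else 0
termination_by s.length - counter
decreasing_by omega

def ISBNValidFormat (isbn : String) : Int :=
  -- str(isbn) on a str is the identity; the replaces are exact via PySem.Str.replace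
  let s := (PySem.Str.replace (PySem.Str.replace isbn "-" "") " " "").toList
  if s.length ≠ 10 ∧ s.length ≠ 13 then 0
  else if s.length = 13 ∧ ¬ (PySem.List.slice s none (some 3) = "978".toList ∨
                             PySem.List.slice s none (some 3) = "979".toList) then 0
  else pvAWhile s 0

-- ===== PORT B =====

-- the regex character classes [0-9] and [0-9X]
def pvIsDig (c : Char) : Bool := '0' ≤ c && c ≤ '9'
def pvIsCheck (c : Char) : Bool := pvIsDig c || c == 'X'

-- [0-9]{n}: consume exactly n digit characters, returning the rest (none = no match)
def pvEatDigits : Nat → List Char → Option (List Char)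
  | 0, l => some l
  | _ + 1, [] => none
  | n + 1, c :: l => if pvIsDig c then pvEatDigits n l else none

-- [0-9]{9}[0-9X]$ : nine digits, one check character, end of input
def pvMatchTail (l : List Char) : Bool :=
  match pvEatDigits 9 l with
  | some [c] => pvIsCheck c
  | _ => false

-- (97[89])?[0-9]{9}[0-9X], anchored at both ends: the greedy optional group is tried
-- first, backtracking to the empty alternative (hand port of re.fullmatch, exact for
-- this pattern)
def pvMatchISBN (s : List Char) : Bool :=
  match s with
  | '9' :: '7' :: c :: rest =>
      ((c == '8' || c == '9') && pvMatchTail rest) || pvMatchTail s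
  | _ => pvMatchTail s

def ISBNValidFormat_alt (isbn : String) : Int :=
  let s := (PySem.Str.replace (PySem.Str.replace isbn "-" "") " " "").toList
  if pvMatchISBN s then 1 else 0

-- ===== PRECONDITION & SPEC =====
def Spec_ISBNValidFormat (isbn : String) (out : Int) : Prop := out = ISBNValidFormat_alt isbn
instance (isbn : String) (out : Int) : Decidable (Spec_ISBNValidFormat isbn out) := by unfold Spec_ISBNValidFormat; infer_instance

-- ===== CLAIM (what is proved, stated in full; the proofs are below) =====
def Claim_equal_ISBNValidFormat : Prop := ∀ (isbn : String), Dom_ISBNValidFormat isbn → Spec_ISBNValidFormat isbn (ISBNValidFormat isbn)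

-- ===== LEMMAS AND PROOFS =====
theorem charToNat_inj {c d : Char} (h : c.toNat = d.toNat) : c = d :=
  Char.ext (UInt32.toNat_inj.mp h)
theorem mem_pvDigitsA (c : Char) : (c ∈ pvDigitsA) = (pvIsDig c = true) := by
  simp only [eq_iff_iff, pvDigitsA, pvIsDig, List.mem_cons, List.not_mem_nil, or_false,
    Bool.and_eq_true, decide_eq_true_eq]
  constructor
  · rintro (rfl|rfl|rfl|rfl|rfl|rfl|rfl|rfl|rfl|rfl) <;> exact ⟨by decide, by decide⟩
  · rintro ⟨h1, h2⟩
    have h48 : (48:Nat) ≤ c.toNat := by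
      rw [Char.le_def] at h1; exact UInt32.le_iff_toNat_le.mp h1
    have h57 : c.toNat ≤ 57 := by
      rw [Char.le_def] at h2; exact UInt32.le_iff_toNat_le.mp h2
    interval_cases hn : c.toNat <;>
      first
      | exact Or.inl (charToNat_inj (d := '0') hn)
      | exact Or.inr (Or.inl (charToNat_inj (d := '1') hn))
      | exact Or.inr (Or.inr (Or.inl (charToNat_inj (d := '2') hn)))
      | exact Or.inr (Or.inr (Or.inr (Or.inl (charToNat_inj (d := '3') hn))))
      | exact Or.inr (Or.inr (Or.inr (Or.inr (Or.inl (charToNat_inj (d := '4') hn)))))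
      | exact Or.inr (Or.inr (Or.inr (Or.inr (Or.inr (Or.inl (charToNat_inj (d := '5') hn))))))
      | exact Or.inr (Or.inr (Or.inr (Or.inr (Or.inr (Or.inr (Or.inl (charToNat_inj (d := '6') hn)))))))
      | exact Or.inr (Or.inr (Or.inr (Or.inr (Or.inr (Or.inr (Or.inr (Or.inl (charToNat_inj (d := '7') hn))))))))
      | exact Or.inr (Or.inr (Or.inr (Or.inr (Or.inr (Or.inr (Or.inr (Or.inr (Or.inl (charToNat_inj (d := '8') hn)))))))))
      | exact Or.inr (Or.inr (Or.inr (Or.inr (Or.inr (Or.inr (Or.inr (Or.inr (Or.inr (charToNat_inj (d := '9') hn)))))))))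
theorem mem_pvCheck (c : Char) : (c ∈ (pvDigitsA ++ ['X'])) = (pvIsCheck c = true) := by
  simp [pvIsCheck, mem_pvDigitsA c]
theorem pvEatDigits_spec (n : Nat) (l : List Char) :
    pvEatDigits n l = if n ≤ l.length ∧ (l.take n).all pvIsDig then some (l.drop n) else none := by
  induction n generalizing l with
  | zero => simp [pvEatDigits]
  | succ n ih =>
    cases l with
    | nil => simp [pvEatDigits]
    | cons c l =>
      simp only [pvEatDigits, List.take_succ_cons, List.all_cons, List.length_cons,
        List.drop_succ_cons]
      by_cases hc : pvIsDig c = true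
      · rw [if_pos hc, ih]
        simp [hc]
      · simp [hc]
theorem pvMatchTail_iff (l : List Char) :
    pvMatchTail l = true ↔
      l.length = 10 ∧ (l.take 9).all pvIsDig = true ∧ pvIsCheck (l.getD 9 ' ') = true := by
  unfold pvMatchTail
  rw [pvEatDigits_spec]
  split_ifs with h
  · obtain ⟨hlen, hall⟩ := h
    cases hd : l.drop 9 with
    | nil =>
      have h0 : l.length - 9 = 0 := by simpa using congrArg List.length hd
      constructor
      · intro hb; exact absurd hb (by simp)
      · rintro ⟨h10, -⟩; omega
    | cons c t =>
      cases t with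
      | nil =>
        have hlen10 : l.length = 10 := by
          have := congrArg List.length hd; simp at this; omega
        have hc : l[9]? = some c := by
          have h90 : l[(9:Nat)]? = (l.drop 9)[(0:Nat)]? := by
            rw [List.getElem?_drop]
          rw [h90, hd]; rfl
        have hgd : l.getD 9 ' ' = c := by simp [List.getD, hc]
        rw [hgd]
        simp [hlen10, hall]
      | cons d t =>
        have hge : 11 ≤ l.length := by
          have := congrArg List.length hd; simp at this; omega
        constructor
        · intro hb; exact absurd hb (by simp)
        · rintro ⟨h10, -⟩; omega
  · simp only [false_iff]
    rintro ⟨h10, hall, -⟩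
    exact h ⟨by omega, by simpa using hall⟩
theorem pvAWhile_spec (s : List Char) (counter : Nat) :
    pvAWhile s counter =
      if ((List.range (s.length - 1)).drop counter).all (fun i => pvIsDig (s.getD i ' ')) then
        (if pvIsCheck (s.getD (s.length - 1) ' ') then 1 else 0)
      else 0 := by
  by_cases h : counter < s.length - 1
  · have hdrop : (List.range (s.length - 1)).drop counter =
        counter :: (List.range (s.length - 1)).drop (counter + 1) := by
      rw [List.drop_eq_getElem_cons (by simpa using h)]
      simp
    rw [pvAWhile, if_pos h, hdrop, List.all_cons]
    by_cases hc : pvIsDig (s.getD counter ' ') = true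
    · rw [if_pos (by rw [mem_pvDigitsA]; exact hc), pvAWhile_spec s (counter + 1), hc,
        Bool.true_and]
    · rw [if_neg (by rw [mem_pvDigitsA]; exact hc)]
      rw [Bool.not_eq_true] at hc
      rw [hc, Bool.false_and, if_neg (by simp)]
  · have hnil : (List.range (s.length - 1)).drop counter = [] :=
      List.drop_eq_nil_of_le (by simpa using Nat.le_of_not_lt h)
    rw [pvAWhile, if_neg h, hnil, List.all_nil, if_pos rfl]
    simp only [mem_pvCheck]
termination_by s.length - counter
decreasing_by omega

theorem range_all_eq_take (s : List Char) :
    ((List.range (s.length - 1)).all (fun i => pvIsDig (s.getD i ' '))) =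
      ((s.take (s.length - 1)).all pvIsDig) := by
  rw [List.all_eq, List.all_eq]
  simp only [decide_eq_decide]
  constructor
  · intro h x hx
    rw [List.mem_take_iff_getElem] at hx
    obtain ⟨i, hi, rfl⟩ := hx
    have hmem : i ∈ List.range (s.length - 1) := by
      simp only [List.mem_range]; omega
    have := h _ hmem
    simpa [List.getD, List.getElem?_eq_getElem (show i < s.length by omega)] using this
  · intro h i hi
    simp only [List.mem_range] at hi
    have hil : i < s.length := by omega
    have hmem : s[i] ∈ s.take (s.length - 1) := by
      rw [List.mem_take_iff_getElem]
      exact ⟨i, by omega, rfl⟩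
    have := h _ hmem
    simpa [List.getD, List.getElem?_eq_getElem hil] using this


-- the core equality on the cleaned character list
theorem core_eq (s : List Char) :
    (if s.length ≠ 10 ∧ s.length ≠ 13 then (0 : Int)
     else if s.length = 13 ∧ ¬ (PySem.List.slice s none (some 3) = "978".toList ∨
                                PySem.List.slice s none (some 3) = "979".toList) then 0
     else pvAWhile s 0) = (if pvMatchISBN s then 1 else 0) := by
  have htail := pvMatchTail_iff
  by_cases h10 : s.length = 10
  · -- length 10: A runs the loop; B can only match via the empty-prefix alternative
    rw [if_neg (by omega), if_neg (by omega)]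
    rw [pvAWhile_spec, List.drop_zero, range_all_eq_take]
    have hnopfx : ∀ rest : List Char, s = '9' :: '7' :: '8' :: rest ∨ s = '9' :: '7' :: '9' :: rest →
        pvMatchTail rest = false := by
      rintro rest (rfl|rfl) <;>
      · rw [Bool.eq_false_iff]
        intro hb
        rw [pvMatchTail_iff] at hb
        simp only [List.length_cons] at h10
        omega
    have hB : pvMatchISBN s = pvMatchTail s := by
      unfold pvMatchISBN
      split
      · next c rest =>
        by_cases hc8 : c = '8'
        · subst hc8; rw [hnopfx rest (Or.inl rfl)]; simp
        · by_cases hc9 : c = '9'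
          · subst hc9; rw [hnopfx rest (Or.inr rfl)]; simp
          · simp [hc8, hc9]
      · rfl
    rw [hB, show s.length - 1 = 9 from by omega]
    by_cases hm : pvMatchTail s = true
    · have hm' := (htail s).mp hm
      rw [if_pos hm'.2.1, if_pos hm'.2.2, hm, if_pos rfl]
    · have hm2 : ¬ (s.length = 10 ∧ (s.take 9).all pvIsDig = true ∧
          pvIsCheck (s.getD 9 ' ') = true) := fun hx => hm ((htail s).mpr hx)
      push Not at hm2
      rw [Bool.eq_false_iff.mpr hm, if_neg (Bool.false_ne_true)]
      rcases hb : (s.take 9).all pvIsDig with _ | _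
      · rw [if_neg (Bool.false_ne_true)]
      · rw [if_pos rfl, if_neg (hm2 h10 hb)]
  · by_cases h13 : s.length = 13
    · -- length 13
      rw [if_neg (by omega)]
      have hslice : PySem.List.slice s none (some 3) = s.take 3 := by
        simp [PySem.List.slice_to]
      have hnotail : pvMatchTail s = false := by
        rw [Bool.eq_false_iff]; intro hb; rw [htail] at hb; omega
      by_cases hpfx : s.take 3 = "978".toList ∨ s.take 3 = "979".toList
      · rw [if_neg (fun hcon => hcon.2 (by rw [hslice]; exact hpfx))]
        obtain ⟨c, rest, hs, hc⟩ : ∃ c rest, s = '9' :: '7' :: c :: rest ∧ (c = '8' ∨ c = '9') := by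
          have hlen3 : 3 ≤ s.length := by omega
          obtain ⟨a, b, cc, t, hst⟩ : ∃ a b cc t, s = a :: b :: cc :: t := by
            match s, hlen3 with
            | a :: b :: cc :: t, _ => exact ⟨a, b, cc, t, rfl⟩
          subst hst
          have h978 : "978".toList = ['9', '7', '8'] := rfl
          have h979 : "979".toList = ['9', '7', '9'] := rfl
          rcases hpfx with hp | hp
          · rw [h978] at hp
            have : a = '9' ∧ b = '7' ∧ cc = '8' := by simpa using hp
            exact ⟨cc, t, by rw [this.1, this.2.1], Or.inl this.2.2⟩
          · rw [h979] at hp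
            have : a = '9' ∧ b = '7' ∧ cc = '9' := by simpa using hp
            exact ⟨cc, t, by rw [this.1, this.2.1], Or.inr this.2.2⟩
        subst hs
        have hlen : rest.length = 10 := by
          simp only [List.length_cons] at h13; omega
        have hcb : (c == '8' || c == '9') = true := by
          rcases hc with rfl | rfl <;> decide
        have hBm : pvMatchISBN ('9' :: '7' :: c :: rest) =
            ((c == '8' || c == '9') && pvMatchTail rest || pvMatchTail ('9' :: '7' :: c :: rest)) := rfl
        rw [hBm, hnotail, Bool.or_false, hcb, Bool.true_and]
        -- A's loop on the whole string vs the tail match on rest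
        rw [pvAWhile_spec, List.drop_zero, range_all_eq_take]
        have hlen' : ('9' :: '7' :: c :: rest).length - 1 = 12 := by
          simp only [List.length_cons]; omega
        rw [hlen']
        have hcd : pvIsDig c = true := by rcases hc with rfl | rfl <;> decide
        have htake : ('9' :: '7' :: c :: rest).take 12 = '9' :: '7' :: c :: rest.take 9 := by
          simp
        have hget : ('9' :: '7' :: c :: rest).getD 12 ' ' = rest.getD 9 ' ' := by
          simp [List.getD]
        rw [htake, hget]
        have h97 : pvIsDig '9' = true := by decide
        have h77 : pvIsDig '7' = true := by decide
        rw [List.all_cons, List.all_cons, List.all_cons, h97, h77, hcd,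
          Bool.true_and, Bool.true_and, Bool.true_and]
        by_cases hm : pvMatchTail rest = true
        · have hm' := (htail rest).mp hm
          rw [if_pos hm'.2.1, if_pos hm'.2.2, hm, if_pos rfl]
        · have hm2 : ¬ (rest.length = 10 ∧ (rest.take 9).all pvIsDig = true ∧
              pvIsCheck (rest.getD 9 ' ') = true) := fun hx => hm ((htail rest).mpr hx)
          push Not at hm2
          rw [Bool.eq_false_iff.mpr hm, if_neg (Bool.false_ne_true)]
          rcases hb : (rest.take 9).all pvIsDig with _ | _
          · rw [if_neg (Bool.false_ne_true)]
          · rw [if_pos rfl, if_neg (hm2 hlen hb)]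
      · rw [if_pos ⟨h13, fun hcon => hpfx (by rw [hslice] at hcon; exact hcon)⟩]
        have hz : pvMatchISBN s = false := by
          unfold pvMatchISBN
          split
          · next c rest =>
            rw [hnotail, Bool.or_false, Bool.eq_false_iff]
            intro hb
            rw [Bool.and_eq_true] at hb
            apply hpfx
            rcases Bool.or_eq_true .. |>.mp hb.1 with h8 | h9
            · left; rw [beq_iff_eq] at h8; rw [h8]; rfl
            · right; rw [beq_iff_eq] at h9; rw [h9]; rfl
          · exact hnotail
        rw [hz, if_neg (Bool.false_ne_true)]
    · -- other lengths: both return 0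
      rw [if_pos ⟨h10, h13⟩]
      have hno : ∀ l : List Char, l.length ≠ 10 → pvMatchTail l = false := by
        intro l hl
        rw [Bool.eq_false_iff]; intro hb; rw [htail] at hb; exact hl hb.1
      have hz : pvMatchISBN s = false := by
        unfold pvMatchISBN
        split
        · next c rest =>
          have h1 : pvMatchTail rest = false := by
            apply hno; simp only [List.length_cons] at h13 ⊢; omega
          have h2 := hno _ h10
          rw [h1, h2]; simp
        · exact hno _ h10
      rw [hz, if_neg (Bool.false_ne_true)]

-- ===== VERDICT (by name: the statement is the Claim_ definition above) =====
theorem ISBNValidFormat_spec : Claim_equal_ISBNValidFormat := by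
  intro isbn _
  unfold Spec_ISBNValidFormat ISBNValidFormat ISBNValidFormat_alt
  exact core_eq _
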